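-- pv_equiv track=rewrite | github.com/immortal-shuan/PrLM | ner/ner_pro.py | gen_trg_tag
-- ===== SOURCE A (Python) =====
-- def gen_trg_tag(text_tokens, trg_tokens, trg_tag):
--     tag_len = len(trg_tokens)
--     for i in range(len(text_tokens)-tag_len+1):
--         is_i = True
--         for j in range(tag_len):
--             if trg_tokens[j] != text_tokens[i+j]:
--                 is_i = False
--                 break
--         if is_i == True:
--             trg_tag[i:i+tag_len] = [1]*tag_len
--             break
--     return trg_tag
-- ===== SOURCE B (Python) =====
-- def gen_trg_tag(text_tokens, trg_tokens, trg_tag):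
--     if not trg_tokens:
--         return trg_tag
--     pos = {}
--     for i, tok in enumerate(text_tokens):
--         pos.setdefault(tok, []).append(i)
--     cand = pos.get(trg_tokens[0], [])
--     for j in range(1, len(trg_tokens)):
--         occ = set(pos.get(trg_tokens[j], []))
--         cand = [i for i in cand if i + j in occ]
--     if not cand:
--         return trg_tag
--     i = cand[0]
--     m = len(trg_tokens)
--     trg_tag[i:i + m] = [1] * m
--     return trg_tag
-- ===== Notes on version B (the rewrite author's own statement) =====
-- stated objective: alternative
-- what changed: B abandons A's sliding-window scan (compare the whole pattern at each start position, break on first hit) for an inverted-index algorithm: one pass builds a token->positions dictionary, the candidate starts are the positions of the first pattern token intersected with the shifted position sets of every later pattern token, and the smallest surviving candidate (head of the ascending list) is painted.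
import Mathlib
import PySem

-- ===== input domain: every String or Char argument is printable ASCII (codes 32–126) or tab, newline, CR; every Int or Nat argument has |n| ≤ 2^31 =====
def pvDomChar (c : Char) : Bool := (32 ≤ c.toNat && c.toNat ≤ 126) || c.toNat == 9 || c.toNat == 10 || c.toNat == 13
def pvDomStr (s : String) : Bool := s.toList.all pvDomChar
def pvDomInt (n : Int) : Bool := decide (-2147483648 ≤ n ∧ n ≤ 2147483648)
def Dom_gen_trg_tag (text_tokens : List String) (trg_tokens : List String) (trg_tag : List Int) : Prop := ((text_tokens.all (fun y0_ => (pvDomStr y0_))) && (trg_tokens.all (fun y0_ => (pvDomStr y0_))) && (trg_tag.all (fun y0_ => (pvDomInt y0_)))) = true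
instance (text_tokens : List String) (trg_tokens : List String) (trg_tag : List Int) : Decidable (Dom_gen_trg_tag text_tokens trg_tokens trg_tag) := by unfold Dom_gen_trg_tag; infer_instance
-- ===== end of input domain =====

-- B replaces A's sliding-window scan by an inverted index (token -> ascending positions) whose
-- shifted position sets are intersected; the smallest surviving candidate is painted
-- (objective: alternative).  Both A and B mutate trg_tag in place via the same slice assignment
-- at the same position; the theorems are about the return value.

-- ===== PORT A =====
-- inner 'for j in range(tag_len)' with break, returning is_i.
-- text_tokens[i+j] is read with getD "": A only evaluates it with i+j in range (outer guard).
def pvInnerA (text_tokens trg_tokens : List String) (i : Nat) (j : Nat) : Bool :=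
  if h : j < trg_tokens.length then
    if trg_tokens[j] ≠ text_tokens.getD (i + j) "" then false
    else pvInnerA text_tokens trg_tokens i (j + 1)
  else true
termination_by trg_tokens.length - j

-- outer 'for i in range(len(text_tokens)-tag_len+1)' with break.
-- trg_tag[i:i+tag_len] = [1]*tag_len is take i ++ replicate ++ drop (i+tag_len) (exact: 0 ≤ i, clamped).
def pvOuterA (text_tokens trg_tokens : List String) (trg_tag : List Int) (i : Nat) : List Int :=
  if h : (i : Int) < (text_tokens.length : Int) - (trg_tokens.length : Int) + 1 then
    if pvInnerA text_tokens trg_tokens i 0 then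
      trg_tag.take i ++ List.replicate trg_tokens.length (1 : Int) ++ trg_tag.drop (i + trg_tokens.length)
    else pvOuterA text_tokens trg_tokens trg_tag (i + 1)
  else trg_tag
termination_by text_tokens.length + 1 - i
decreasing_by omega

def gen_trg_tag (text_tokens : List String) (trg_tokens : List String) (trg_tag : List Int) : List Int :=
  pvOuterA text_tokens trg_tokens trg_tag 0

-- ===== PORT B =====
-- 'for i, tok in enumerate(text_tokens): pos.setdefault(tok, []).append(i)'
-- (append to the list stored under tok, [] if absent = Dict.modify with default []; enumerate indices are Python ints).
def pvIndexB (text_tokens : List String) : PySem.Dict String (List Int) :=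
  (PySem.List.enumerate text_tokens).foldl
    (fun d it => d.modify it.2 [] (fun l => l ++ [it.1])) PySem.Dict.empty

-- 'for j in range(1, len(trg_tokens)): occ = set(pos.get(trg_tokens[j], [])); cand = [i for i in cand if i + j in occ]'
def pvRefineB (posd : PySem.Dict String (List Int)) (trg_tokens : List String)
    (cand : List Int) (j : Nat) : List Int :=
  if h : j < trg_tokens.length then
    pvRefineB posd trg_tokens
      (cand.filter (fun i => (PySem.Set.ofList (posd.getD trg_tokens[j] [])).contains (i + (j : Int))))
      (j + 1)
  else cand
termination_by trg_tokens.length - j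

-- 'if not cand: return trg_tag' then paint at i = cand[0]; i is a nonnegative position, so the
-- slice assignment trg_tag[i:i+m] = [1]*m is take i.toNat ++ replicate ++ drop (exact, clamped).
def gen_trg_tag_alt (text_tokens : List String) (trg_tokens : List String) (trg_tag : List Int) : List Int :=
  match trg_tokens with
  | [] => trg_tag
  | head :: _ =>
    let posd := pvIndexB text_tokens
    match pvRefineB posd trg_tokens (posd.getD head []) 1 with
    | [] => trg_tag
    | i :: _ =>
      trg_tag.take i.toNat ++ List.replicate trg_tokens.length (1 : Int)
        ++ trg_tag.drop (i.toNat + trg_tokens.length)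

-- ===== PRECONDITION & SPEC =====
def Spec_gen_trg_tag (text_tokens : List String) (trg_tokens : List String) (trg_tag : List Int) (out : List Int) : Prop := out = gen_trg_tag_alt text_tokens trg_tokens trg_tag
instance (text_tokens : List String) (trg_tokens : List String) (trg_tag : List Int) (out : List Int) : Decidable (Spec_gen_trg_tag text_tokens trg_tokens trg_tag out) := by unfold Spec_gen_trg_tag; infer_instance

-- ===== CLAIM (what is proved, stated in full; the proofs are below) =====
def Claim_equal_gen_trg_tag : Prop := ∀ (text_tokens : List String) (trg_tokens : List String) (trg_tag : List Int), Dom_gen_trg_tag text_tokens trg_tokens trg_tag → Spec_gen_trg_tag text_tokens trg_tokens trg_tag (gen_trg_tag text_tokens trg_tokens trg_tag)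

-- ===== LEMMAS AND PROOFS =====

-- reference: first i ≥ s with i + m ≤ n at which trg_tokens is a prefix of text_tokens.drop i
def refFind (text_tokens trg_tokens : List String) (s : Nat) : Option Nat :=
  if h : s + trg_tokens.length ≤ text_tokens.length then
    if trg_tokens.isPrefixOf (text_tokens.drop s) then some s
    else refFind text_tokens trg_tokens (s + 1)
  else none
termination_by text_tokens.length + 1 - s

def paint (trg_tag : List Int) (m : Nat) : Option Nat → List Int
  | none => trg_tag
  | some i => trg_tag.take i ++ List.replicate m (1 : Int) ++ trg_tag.drop (i + m)

def matchAt (text_tokens trg_tokens : List String) (i : Nat) : Prop :=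
  i + trg_tokens.length ≤ text_tokens.length ∧ trg_tokens.isPrefixOf (text_tokens.drop i)

def matchB (text_tokens trg_tokens : List String) (i : Nat) : Bool :=
  decide (i + trg_tokens.length ≤ text_tokens.length) && trg_tokens.isPrefixOf (text_tokens.drop i)

theorem matchB_iff (text_tokens trg_tokens : List String) (i : Nat) :
    matchB text_tokens trg_tokens i = true ↔ matchAt text_tokens trg_tokens i := by
  simp [matchB, matchAt]

-- ===== A-side: pvOuterA computes paint (refFind 0) =====

theorem innerA_eq (text_tokens trg_tokens : List String) (i : Nat)
    (hle : i + trg_tokens.length ≤ text_tokens.length) :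
    ∀ j, pvInnerA text_tokens trg_tokens i j =
      (trg_tokens.drop j).isPrefixOf (text_tokens.drop (i + j)) := by
  intro j
  fun_induction pvInnerA text_tokens trg_tokens i j with
  | case1 j h hne =>
      have hij : i + j < text_tokens.length := by omega
      rw [List.drop_eq_getElem_cons h, List.drop_eq_getElem_cons hij]
      simp only [List.getD_eq_getElem text_tokens "" hij] at hne
      simp [List.isPrefixOf, hne]
  | case2 j h heq ih =>
      have hij : i + j < text_tokens.length := by omega
      rw [List.drop_eq_getElem_cons h, List.drop_eq_getElem_cons hij]
      simp only [List.getD_eq_getElem text_tokens "" hij, not_not] at heq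
      have h2 : i + j + 1 = i + (j + 1) := by omega
      simp [List.isPrefixOf, heq, h2, ih]
  | case3 j h =>
      have : trg_tokens.drop j = [] := by
        simp [List.drop_eq_nil_iff]; omega
      simp [this]

theorem refFind_oob (text_tokens trg_tokens : List String) (s : Nat)
    (h : ¬ (s + trg_tokens.length ≤ text_tokens.length)) :
    refFind text_tokens trg_tokens s = none := by
  rw [refFind]; simp [h]

theorem refFind_hit (text_tokens trg_tokens : List String) (s : Nat)
    (h : s + trg_tokens.length ≤ text_tokens.length)
    (hp : trg_tokens.isPrefixOf (text_tokens.drop s)) :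
    refFind text_tokens trg_tokens s = some s := by
  rw [refFind]; simp [h, hp]

theorem refFind_step (text_tokens trg_tokens : List String) (s : Nat)
    (h : s + trg_tokens.length ≤ text_tokens.length)
    (hp : ¬ trg_tokens.isPrefixOf (text_tokens.drop s)) :
    refFind text_tokens trg_tokens s = refFind text_tokens trg_tokens (s + 1) := by
  rw [refFind]; simp [h, hp]

theorem isPrefixOf_iff_take (l1 l2 : List String) :
    l1.isPrefixOf l2 ↔ l2.take l1.length = l1 := by
  rw [List.isPrefixOf_iff_prefix, List.prefix_iff_eq_take]
  exact ⟨fun h => h.symm, fun h => h.symm⟩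

theorem outerA_eq (text_tokens trg_tokens : List String) (trg_tag : List Int) :
    ∀ i, pvOuterA text_tokens trg_tokens trg_tag i =
      paint trg_tag trg_tokens.length (refFind text_tokens trg_tokens i) := by
  intro i
  fun_induction pvOuterA text_tokens trg_tokens trg_tag i with
  | case1 i hg hin =>
      have hle : i + trg_tokens.length ≤ text_tokens.length := by omega
      have hp : trg_tokens.isPrefixOf (text_tokens.drop i) := by
        have := innerA_eq text_tokens trg_tokens i hle 0
        simpa [hin] using this.symm
      rw [refFind_hit _ _ _ hle hp]; rfl
  | case2 i hg hin ih =>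
      have hle : i + trg_tokens.length ≤ text_tokens.length := by omega
      have hnp : ¬ trg_tokens.isPrefixOf (text_tokens.drop i) := by
        intro hp
        have := innerA_eq text_tokens trg_tokens i hle 0
        simp [hin, hp] at this
      rw [refFind_step _ _ _ hle hnp]; exact ih
  | case3 i hg =>
      rw [refFind_oob _ _ _ (by omega)]; rfl

-- ===== pointwise characterisation of a match =====

theorem prefix_pointwise (text_tokens trg_tokens : List String) (i : Nat)
    (h : i + trg_tokens.length ≤ text_tokens.length) :
    trg_tokens.isPrefixOf (text_tokens.drop i) ↔
      ∀ j, j < trg_tokens.length → text_tokens.getD (i + j) "" = trg_tokens.getD j "" := by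
  rw [isPrefixOf_iff_take]
  constructor
  · intro ht j hj
    have h1 : j < ((text_tokens.drop i).take trg_tokens.length).length := by
      simp [List.length_take, List.length_drop]; omega
    have := List.getElem_of_eq ht h1
    simp only [List.getElem_take, List.getElem_drop] at this
    rw [List.getD_eq_getElem _ _ (by omega : i + j < text_tokens.length),
        List.getD_eq_getElem _ _ hj, ← this]
  · intro hp
    apply List.ext_getElem
    · simp [List.length_take, List.length_drop]; omega
    · intro j h1 h2
      have hj : j < trg_tokens.length := h2
      have := hp j hj
      rw [List.getD_eq_getElem _ _ (by omega : i + j < text_tokens.length),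
          List.getD_eq_getElem _ _ hj] at this
      simpa [List.getElem_take, List.getElem_drop] using this

-- ===== B-side: the inverted index =====

theorem indexB_getD (text_tokens : List String) (tok : String) :
    (pvIndexB text_tokens).getD tok [] =
      ((PySem.List.enumerate text_tokens).filter (fun it => it.2 == tok)).map (fun it => it.1) := by
  unfold pvIndexB
  have hfold : (PySem.List.enumerate text_tokens).foldl
      (fun d it => d.modify it.2 [] (fun l => l ++ [it.1])) PySem.Dict.empty
    = ((PySem.List.enumerate text_tokens).map (fun it => (it.2, it.1))).foldl
      (fun d p => d.modify p.1 [] (fun l => l ++ [p.2])) PySem.Dict.empty := by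
    rw [List.foldl_map]
  rw [hfold, PySem.Dict.getD_foldl_modify_append]
  simp [List.filter_map, List.map_map, Function.comp_def]

theorem mem_occ (text_tokens : List String) (tok : String) (x : Int) :
    x ∈ (pvIndexB text_tokens).getD tok [] ↔
      ∃ k : Nat, ∃ _ : k < text_tokens.length, x = (k : Int) ∧ text_tokens[k] = tok := by
  rw [indexB_getD]
  simp only [List.mem_map, List.mem_filter, PySem.List.mem_enumerate_iff]
  constructor
  · rintro ⟨p, ⟨⟨k, hk, rfl⟩, heq⟩, h1⟩
    simp only [beq_iff_eq] at heq
    exact ⟨k, hk, by simpa using h1.symm, heq⟩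
  · rintro ⟨k, hk, rfl, htok⟩
    exact ⟨((k : Int), text_tokens[k]), ⟨⟨k, hk, by simp⟩, by simp [htok]⟩, rfl⟩

theorem pairwise_occ (text_tokens : List String) (tok : String) :
    ((pvIndexB text_tokens).getD tok []).Pairwise (· < ·) := by
  rw [indexB_getD]
  exact List.pairwise_map.2 ((PySem.List.pairwise_lt_enumerate text_tokens 0).filter _)

-- ===== B-side: the refinement loop =====

theorem refine_sublist (posd : PySem.Dict String (List Int)) (trg_tokens : List String) :
    ∀ (fuel j : Nat) (cand : List Int), trg_tokens.length ≤ j + fuel →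
      (pvRefineB posd trg_tokens cand j).Sublist cand := by
  intro fuel
  induction fuel with
  | zero =>
      intro j cand h
      rw [pvRefineB]
      have hnj : ¬ j < trg_tokens.length := by omega
      simp [hnj]
  | succ fuel ih =>
      intro j cand h
      rw [pvRefineB]
      split
      · exact (ih (j + 1) _ (by omega)).trans (List.filter_sublist)
      · exact List.Sublist.refl _

theorem refine_mem (posd : PySem.Dict String (List Int)) (trg_tokens : List String) :
    ∀ (fuel j : Nat) (cand : List Int) (x : Int), trg_tokens.length ≤ j + fuel →
      (x ∈ pvRefineB posd trg_tokens cand j ↔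
        x ∈ cand ∧ ∀ j' : Nat, j ≤ j' → ∀ hj : j' < trg_tokens.length,
          (x + (j' : Int)) ∈ posd.getD trg_tokens[j'] []) := by
  intro fuel
  induction fuel with
  | zero =>
      intro j cand x h
      rw [pvRefineB]
      have hnj : ¬ j < trg_tokens.length := by omega
      simp only [hnj, dite_false]
      constructor
      · intro hx; exact ⟨hx, fun j' hle hj => by omega⟩
      · exact fun hx => hx.1
  | succ fuel ih =>
      intro j cand x h
      rw [pvRefineB]
      by_cases hj : j < trg_tokens.length
      · simp only [hj, dite_true]
        rw [ih (j + 1) _ x (by omega), List.mem_filter]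
        have hcont : ((PySem.Set.ofList (posd.getD trg_tokens[j] [])).contains (x + (j : Int)) = true)
            ↔ (x + (j : Int)) ∈ posd.getD trg_tokens[j] [] := by
          simp [PySem.Set.contains, PySem.Set.mem_ofList]
        constructor
        · rintro ⟨⟨hx, hc⟩, hrest⟩
          refine ⟨hx, fun j' hle hj' => ?_⟩
          rcases Nat.eq_or_lt_of_le hle with rfl | hlt
          · exact hcont.1 hc
          · exact hrest j' hlt hj'
        · rintro ⟨hx, hall⟩
          exact ⟨⟨hx, hcont.2 (hall j le_rfl hj)⟩, fun j' hle hj' => hall j' (by omega) hj'⟩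
      · simp only [hj, dite_false]
        constructor
        · intro hx; exact ⟨hx, fun j' hle hj' => by omega⟩
        · exact fun hx => hx.1

-- ===== sorted lists with the same members are equal =====

theorem sorted_ext : ∀ (l1 l2 : List Int), l1.Pairwise (· < ·) → l2.Pairwise (· < ·) →
    (∀ x, x ∈ l1 ↔ x ∈ l2) → l1 = l2 := by
  intro l1
  induction l1 with
  | nil =>
      intro l2 _ _ hm
      cases l2 with
      | nil => rfl
      | cons b s => exact absurd ((hm b).2 (List.mem_cons_self)) (by simp)
  | cons a t ih =>
      intro l2 h1 h2 hm
      cases l2 with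
      | nil => exact absurd ((hm a).1 (List.mem_cons_self)) (by simp)
      | cons b s =>
          have hat : ∀ y ∈ t, a < y := fun y hy => (List.pairwise_cons.1 h1).1 y hy
          have hbs : ∀ y ∈ s, b < y := fun y hy => (List.pairwise_cons.1 h2).1 y hy
          have hab : a = b := by
            rcases List.mem_cons.1 ((hm a).1 (List.mem_cons_self)) with h | h
            · exact h
            rcases List.mem_cons.1 ((hm b).2 (List.mem_cons_self)) with h' | h'
            · exact h'.symm
            · have := hbs a h; have := hat b h'; omega
          subst hab
          have hts : ∀ x, x ∈ t ↔ x ∈ s := by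
            intro x
            constructor
            · intro hx
              rcases List.mem_cons.1 ((hm x).1 (List.mem_cons_of_mem a hx)) with rfl | h
              · have := hat x hx; omega
              · exact h
            · intro hx
              rcases List.mem_cons.1 ((hm x).2 (List.mem_cons_of_mem a hx)) with rfl | h
              · have := hbs x hx; omega
              · exact h
          rw [ih s (List.pairwise_cons.1 h1).2 (List.pairwise_cons.1 h2).2 hts]

-- ===== the final candidate list is the ascending list of all match positions =====

def matchList (text_tokens trg_tokens : List String) : List Nat :=
  (List.range' 0 text_tokens.length).filter (matchB text_tokens trg_tokens)

theorem cand_final_eq (text_tokens : List String) (head : String) (rest : List String) :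
    pvRefineB (pvIndexB text_tokens) (head :: rest) ((pvIndexB text_tokens).getD head []) 1 =
      (matchList text_tokens (head :: rest)).map (fun (k : Nat) => (k : Int)) := by
  apply sorted_ext
  · exact (pairwise_occ text_tokens head).sublist
      (refine_sublist (pvIndexB text_tokens) (head :: rest) (head :: rest).length 1 _ (by omega))
  · refine List.pairwise_map.2 ?_
    refine ((List.pairwise_lt_range' 1).filter _).imp ?_
    intro a b hab
    exact_mod_cast hab
  · intro x
    rw [refine_mem (pvIndexB text_tokens) (head :: rest) (head :: rest).length 1 _ x (by omega), mem_occ]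
    simp only [List.mem_map, matchList, List.mem_filter, List.mem_range'_1, matchB_iff]
    constructor
    · rintro ⟨⟨k, hk, rfl, hhead⟩, hall⟩
      refine ⟨k, ⟨⟨by omega, by omega⟩, ?_⟩, rfl⟩
      have hlen : k + (head :: rest).length ≤ text_tokens.length := by
        rcases Nat.eq_zero_or_pos rest.length with h0 | hpos
        · simp [h0]; omega
        · have := hall rest.length (by omega) (by simp)
          rw [mem_occ] at this
          obtain ⟨k', hk', hkk', _⟩ := this
          have : k + rest.length = k' := by exact_mod_cast hkk'
          simp only [List.length_cons]; omega
      refine ⟨hlen, (prefix_pointwise _ _ k hlen).2 ?_⟩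
      intro j hj
      cases j with
      | zero =>
          show text_tokens.getD (k + 0) "" = (head :: rest).getD 0 ""
          rw [show k + 0 = k from rfl, List.getD_eq_getElem _ _ hk, List.getD_cons_zero]
          exact hhead
      | succ j' =>
          have hj1 : j' + 1 < (head :: rest).length := hj
          have := hall (j' + 1) (by omega) hj1
          rw [mem_occ] at this
          obtain ⟨k', hk', hkk', htok'⟩ := this
          have hkeq : k + (j' + 1) = k' := by exact_mod_cast hkk'
          subst hkeq
          rw [List.getD_eq_getElem _ _ hk', List.getD_eq_getElem _ _ hj1]
          simpa using htok'
    · rintro ⟨k, ⟨⟨_, hkn0⟩, hm⟩, rfl⟩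
      have hkn : k < text_tokens.length := by omega
      obtain ⟨hlen, hpre⟩ := hm
      have hpw := (prefix_pointwise _ _ k hlen).1 hpre
      constructor
      · refine ⟨k, hkn, rfl, ?_⟩
        have := hpw 0 (by simp)
        rw [show k + 0 = k from rfl, List.getD_eq_getElem _ _ hkn, List.getD_cons_zero] at this
        exact this
      · intro j' hle hj
        rw [mem_occ]
        refine ⟨k + j', by simp only [List.length_cons] at hlen hj ⊢; omega, by push_cast; ring, ?_⟩
        have := hpw j' hj
        rw [List.getD_eq_getElem _ _ (by simp only [List.length_cons] at hlen hj ⊢; omega : k + j' < text_tokens.length),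
            List.getD_eq_getElem _ _ hj] at this
        exact this

-- ===== refFind finds the head of the match list =====

theorem refFind_eq_head (text_tokens trg_tokens : List String) (hm : 0 < trg_tokens.length) :
    ∀ s, refFind text_tokens trg_tokens s =
      ((List.range' s (text_tokens.length - s)).filter
        (matchB text_tokens trg_tokens)).head? := by
  intro s
  fun_induction refFind text_tokens trg_tokens s with
  | case1 s h hp =>
      have hsn : s < text_tokens.length := by omega
      have hn : text_tokens.length - s = (text_tokens.length - (s + 1)) + 1 := by omega
      rw [hn, List.range'_succ]
      have hmb : matchB text_tokens trg_tokens s = true := (matchB_iff _ _ _).2 ⟨h, hp⟩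
      simp [hmb]
  | case2 s h hp ih =>
      have hsn : s < text_tokens.length := by omega
      have hn : text_tokens.length - s = (text_tokens.length - (s + 1)) + 1 := by omega
      rw [hn, List.range'_succ]
      have hmb : matchB text_tokens trg_tokens s = false := by
        rw [Bool.eq_false_iff]
        intro hc
        exact hp (((matchB_iff _ _ _).1 hc).2)
      simp only [List.filter_cons, hmb, Bool.false_eq_true, if_false]
      exact ih
  | case3 s h =>
      have : (List.range' s (text_tokens.length - s)).filter
          (matchB text_tokens trg_tokens) = [] := by
        rw [List.filter_eq_nil_iff]
        intro i hi
        rw [List.mem_range'_1] at hi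
        intro hc
        have := ((matchB_iff _ _ _).1 hc).1
        omega
      rw [this]; rfl

-- ===== VERDICT (by name: the statement is the Claim_ definition above) =====
theorem gen_trg_tag_spec : Claim_equal_gen_trg_tag := by
  intro text trg tag _
  show gen_trg_tag text trg tag = gen_trg_tag_alt text trg tag
  cases trg with
  | nil =>
      rw [gen_trg_tag, outerA_eq, refFind_hit _ _ 0 (by simp) (by simp [List.isPrefixOf])]
      simp [gen_trg_tag_alt, paint]
  | cons head rest =>
      rw [gen_trg_tag, outerA_eq,
          refFind_eq_head text (head :: rest) (by simp) 0]
      show paint tag (head :: rest).length (matchList text (head :: rest)).head? =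
        gen_trg_tag_alt text (head :: rest) tag
      rw [gen_trg_tag_alt]
      simp only [cand_final_eq]
      cases hml : matchList text (head :: rest) with
      | nil => simp [paint]
      | cons k t => simp [paint, Int.toNat_natCast]
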